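-- pv_equiv track=rewrite | github.com/Bleidhu/Intorduction_to_computer_science_AGH_course | Wstep do informatyki/Zestaw_3/zad16.py | min_max_count
-- ===== SOURCE A (Python) =====
-- def min_max_count(t):
--     min_el = t[0]
--     max_el = t[0]
--     for i in t:
--         if(i < min_el):
--             min_el = i
--         if(i > max_el):
--             max_el = i
--     min_count = 0
--     max_count = 0
--
--     for i in t:
--         if(i == min_el):
--             min_count += 1
--         if(i == max_el):
--             max_count += 1
--
--     if( min_count == 1 and max_count == 1):
--         return True
--     else:
--         return False
-- ===== SOURCE B (Python) =====
-- def min_max_count(t):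
--     min_el = max_el = t[0]
--     min_count = max_count = 1
--     for i in t[1:]:
--         if i < min_el:
--             min_el = i
--             min_count = 1
--         elif i == min_el:
--             min_count += 1
--         if i > max_el:
--             max_el = i
--             max_count = 1
--         elif i == max_el:
--             max_count += 1
--     return min_count == 1 and max_count == 1
-- ===== Notes on version B (the rewrite author's own statement) =====
-- stated objective: alternative
-- what changed: B replaces A's two full passes (one computing min/max, one counting them) by a single pass that tracks the running min/max together with reset-on-new-extreme counters.
import Mathlib
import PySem

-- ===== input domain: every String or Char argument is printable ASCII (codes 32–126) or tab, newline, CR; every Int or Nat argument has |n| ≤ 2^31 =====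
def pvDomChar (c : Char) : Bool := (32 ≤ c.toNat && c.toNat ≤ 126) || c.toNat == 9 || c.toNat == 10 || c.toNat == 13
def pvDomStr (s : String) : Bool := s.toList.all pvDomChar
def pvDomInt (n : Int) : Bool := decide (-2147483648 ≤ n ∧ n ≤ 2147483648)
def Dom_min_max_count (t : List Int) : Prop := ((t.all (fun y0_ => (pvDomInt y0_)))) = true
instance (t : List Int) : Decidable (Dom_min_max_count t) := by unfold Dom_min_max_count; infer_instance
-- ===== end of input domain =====

-- B: single pass tracking min/max with reset-on-new-extreme counters, instead of A's
-- two full passes (min/max pass then counting pass); same cost class, different decomposition.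

-- ===== PORT A =====
-- A: one loop updating (min_el, max_el), a second loop counting them, then the test.
def min_max_count (t : List Int) : Bool :=
  match t with
  | [] => false   -- unreachable under Pre_: Python raises IndexError indexing the first element
  | h :: _ =>
    let p := t.foldl (fun (p : Int × Int) i =>
      (if i < p.1 then i else p.1, if p.2 < i then i else p.2)) (h, h)
    let q := t.foldl (fun (q : Int × Int) i =>
      (if i = p.1 then q.1 + 1 else q.1, if i = p.2 then q.2 + 1 else q.2)) ((0 : Int), (0 : Int))
    q.1 == 1 && q.2 == 1

-- ===== PORT B =====
def bStep (s : Int × Int × Int × Int) (i : Int) : Int × Int × Int × Int :=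
  let mn := s.1; let mc := s.2.1; let mx := s.2.2.1; let xc := s.2.2.2
  let m2 : Int × Int := if i < mn then (i, 1) else if i = mn then (mn, mc + 1) else (mn, mc)
  let x2 : Int × Int := if mx < i then (i, 1) else if i = mx then (mx, xc + 1) else (mx, xc)
  (m2.1, m2.2, x2.1, x2.2)

def min_max_count_alt (t : List Int) : Bool :=
  match t with
  | [] => false   -- unreachable under Pre_: Python raises IndexError indexing the first element
  | h :: rest =>
    let s := rest.foldl bStep (h, 1, h, 1)
    s.2.1 == 1 && s.2.2.2 == 1

-- ===== PRECONDITION & SPEC =====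
-- Pre_ excludes only the empty list, on which both Pythons raise IndexError indexing the first element.
def Pre_min_max_count (t : List Int) : Prop := t ≠ []
instance (t : List Int) : Decidable (Pre_min_max_count t) := by unfold Pre_min_max_count; infer_instance
def pvWitness_min_max_count : List Int := [0, 1]

def Spec_min_max_count (t : List Int) (out : Bool) : Prop := out = min_max_count_alt t
instance (t : List Int) (out : Bool) : Decidable (Spec_min_max_count t out) := by unfold Spec_min_max_count; infer_instance

-- ===== CLAIM (what is proved, stated in full; the proofs are below) =====
def Claim_equal_min_max_count : Prop := ∀ (t : List Int), Dom_min_max_count t → Pre_min_max_count t → Spec_min_max_count t (min_max_count t)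

-- ===== LEMMAS AND PROOFS =====

-- running min / max, as A's first loop computes them
def mnF (l : List Int) (a : Int) : Int := l.foldl (fun m i => if i < m then i else m) a
def mxF (l : List Int) (a : Int) : Int := l.foldl (fun m i => if m < i then i else m) a

-- occurrence count (as an Int, matching both programs' counters)
def cnt (v : Int) : List Int → Int
  | [] => 0
  | i :: l => (if i = v then 1 else 0) + cnt v l

theorem mnF_cons (i a : Int) (l : List Int) :
    mnF (i :: l) a = mnF l (if i < a then i else a) := rfl
theorem mxF_cons (i a : Int) (l : List Int) :
    mxF (i :: l) a = mxF l (if a < i then i else a) := rfl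

theorem mnF_le (l : List Int) (a : Int) : mnF l a ≤ a := by
  induction l generalizing a with
  | nil => simp [mnF]
  | cons i l ih =>
    rw [mnF_cons]
    by_cases h : i < a
    · simp only [h, if_pos]; exact le_trans (ih i) (le_of_lt h)
    · simp only [h, if_neg, not_false_iff]; exact ih a

theorem le_mxF (l : List Int) (a : Int) : a ≤ mxF l a := by
  induction l generalizing a with
  | nil => simp [mxF]
  | cons i l ih =>
    rw [mxF_cons]
    by_cases h : a < i
    · simp only [h, if_pos]; exact le_trans (le_of_lt h) (ih i)
    · simp only [h, if_neg, not_false_iff]; exact ih a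

-- A's first loop is the pair of running extrema
theorem pairFold_eq (l : List Int) (a b : Int) :
    l.foldl (fun (p : Int × Int) i =>
      (if i < p.1 then i else p.1, if p.2 < i then i else p.2)) (a, b)
    = (mnF l a, mxF l b) := by
  induction l generalizing a b with
  | nil => rfl
  | cons i l ih =>
    simp only [List.foldl_cons, ih, mnF_cons, mxF_cons]

-- A's second loop counts the two values
theorem countFold_eq (l : List Int) (v w c d : Int) :
    l.foldl (fun (q : Int × Int) i =>
      (if i = v then q.1 + 1 else q.1, if i = w then q.2 + 1 else q.2)) (c, d)
    = (c + cnt v l, d + cnt w l) := by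
  induction l generalizing c d with
  | nil => simp [cnt]
  | cons i l ih =>
    simp only [List.foldl_cons, ih, cnt, Prod.mk.injEq]
    constructor <;> split_ifs <;> ring

-- B's fold splits into an independent min-part and max-part
def bMinF (l : List Int) (s : Int × Int) : Int × Int :=
  l.foldl (fun s i => if i < s.1 then (i, 1) else if i = s.1 then (s.1, s.2 + 1) else s) s
def bMaxF (l : List Int) (s : Int × Int) : Int × Int :=
  l.foldl (fun s i => if s.1 < i then (i, 1) else if i = s.1 then (s.1, s.2 + 1) else s) s

theorem bMinF_cons (i : Int) (l : List Int) (s : Int × Int) :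
    bMinF (i :: l) s
    = bMinF l (if i < s.1 then (i, 1) else if i = s.1 then (s.1, s.2 + 1) else s) := rfl
theorem bMaxF_cons (i : Int) (l : List Int) (s : Int × Int) :
    bMaxF (i :: l) s
    = bMaxF l (if s.1 < i then (i, 1) else if i = s.1 then (s.1, s.2 + 1) else s) := rfl

theorem bStep_split (l : List Int) (a b c d : Int) :
    l.foldl bStep (a, b, c, d)
    = ((bMinF l (a, b)).1, (bMinF l (a, b)).2, (bMaxF l (c, d)).1, (bMaxF l (c, d)).2) := by
  induction l generalizing a b c d with
  | nil => rfl
  | cons i l ih =>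
    rw [List.foldl_cons, ih, bMinF_cons, bMaxF_cons]
    simp only [bStep, Prod.mk.eta]

-- characterisation of B's min-part: running min plus reset-on-new-min counter
theorem bMinF_spec (l : List Int) (m c : Int) :
    bMinF l (m, c)
    = (mnF l m, if mnF l m < m then cnt (mnF l m) l else c + cnt m l) := by
  induction l generalizing m c with
  | nil => simp [bMinF, mnF, cnt]
  | cons i l ih =>
    rw [bMinF_cons, mnF_cons]
    rcases lt_trichotomy i m with h1 | h1 | h1
    · rw [if_pos h1, if_pos h1, ih, Prod.mk.injEq]
      refine ⟨rfl, ?_⟩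
      rcases eq_or_lt_of_le (mnF_le l i) with h2 | h2
      · rw [h2, if_neg (lt_irrefl _), if_pos h1]
        simp [cnt]
      · have h3 : mnF l i < m := lt_trans h2 h1
        have hne : ¬ (i = mnF l i) := by omega
        rw [if_pos h2, if_pos h3]
        simp [cnt, hne]
    · subst h1
      rw [if_neg (lt_irrefl _), if_pos rfl, ite_self, ih, Prod.mk.injEq]
      refine ⟨rfl, ?_⟩
      rcases eq_or_lt_of_le (mnF_le l i) with h2 | h2
      · rw [h2, if_neg (lt_irrefl _), if_neg (lt_irrefl _)]
        simp [cnt]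
        ring
      · have hne : ¬ (i = mnF l i) := by omega
        rw [if_pos h2, if_pos h2]
        simp [cnt, hne]
    · have h1' : ¬ i < m := by omega
      have h2' : ¬ i = m := by omega
      rw [if_neg h1', if_neg h2', if_neg h1', ih, Prod.mk.injEq]
      refine ⟨rfl, ?_⟩
      rcases eq_or_lt_of_le (mnF_le l m) with h2 | h2
      · rw [h2, if_neg (lt_irrefl _), if_neg (lt_irrefl _)]
        simp [cnt, h2']
      · have hne : ¬ (i = mnF l m) := by omega
        rw [if_pos h2, if_pos h2]
        simp [cnt, hne]

-- mirror characterisation for the max-part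
theorem bMaxF_spec (l : List Int) (m c : Int) :
    bMaxF l (m, c)
    = (mxF l m, if m < mxF l m then cnt (mxF l m) l else c + cnt m l) := by
  induction l generalizing m c with
  | nil => simp [bMaxF, mxF, cnt]
  | cons i l ih =>
    rw [bMaxF_cons, mxF_cons]
    rcases lt_trichotomy m i with h1 | h1 | h1
    · rw [if_pos h1, if_pos h1, ih, Prod.mk.injEq]
      refine ⟨rfl, ?_⟩
      rcases eq_or_lt_of_le (le_mxF l i) with h2 | h2
      · rw [← h2, if_neg (lt_irrefl _), if_pos h1]
        simp [cnt]
      · have h3 : m < mxF l i := lt_trans h1 h2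
        have hne : ¬ (i = mxF l i) := by omega
        rw [if_pos h2, if_pos h3]
        simp [cnt, hne]
    · subst h1
      rw [if_neg (lt_irrefl _), if_pos rfl, ite_self, ih, Prod.mk.injEq]
      refine ⟨rfl, ?_⟩
      rcases eq_or_lt_of_le (le_mxF l m) with h2 | h2
      · rw [← h2, if_neg (lt_irrefl _), if_neg (lt_irrefl _)]
        simp [cnt]
        ring
      · have hne : ¬ (m = mxF l m) := by omega
        rw [if_pos h2, if_pos h2]
        simp [cnt, hne]
    · have h1' : ¬ m < i := by omega
      have h2' : ¬ i = m := by omega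
      rw [if_neg h1', if_neg h2', if_neg h1', ih, Prod.mk.injEq]
      refine ⟨rfl, ?_⟩
      rcases eq_or_lt_of_le (le_mxF l m) with h2 | h2
      · rw [← h2, if_neg (lt_irrefl _), if_neg (lt_irrefl _)]
        simp [cnt, h2']
      · have hne : ¬ (i = mxF l m) := by omega
        rw [if_pos h2, if_pos h2]
        simp [cnt, hne]

-- B's final min-count equals the count of the overall min in the whole list (incl. head)
theorem b_min_count (h : Int) (rest : List Int) :
    (bMinF rest (h, 1)).2 = cnt (mnF rest h) (h :: rest) := by
  rw [bMinF_spec]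
  rcases eq_or_lt_of_le (mnF_le rest h) with h2 | h2
  · rw [h2]
    simp [cnt]
  · have hne : ¬ (h = mnF rest h) := by omega
    simp [cnt, h2, hne]

theorem b_max_count (h : Int) (rest : List Int) :
    (bMaxF rest (h, 1)).2 = cnt (mxF rest h) (h :: rest) := by
  rw [bMaxF_spec]
  rcases eq_or_lt_of_le (le_mxF rest h) with h2 | h2
  · rw [← h2]
    simp [cnt]
  · have hne : ¬ (h = mxF rest h) := by omega
    simp [cnt, h2, hne]

-- ===== VERDICT (by name: the statement is the Claim_ definition above) =====
theorem min_max_count_spec : Claim_equal_min_max_count := by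
  intro t _ hpre
  unfold Spec_min_max_count
  match t with
  | [] => exact absurd rfl hpre
  | h :: rest =>
    show min_max_count (h :: rest) = min_max_count_alt (h :: rest)
    unfold min_max_count min_max_count_alt
    simp only [bStep_split, pairFold_eq, b_min_count, b_max_count]
    rw [countFold_eq]
    have hmn : mnF (h :: rest) h = mnF rest h := by
      rw [mnF_cons]; simp
    have hmx : mxF (h :: rest) h = mxF rest h := by
      rw [mxF_cons]; simp
    simp only [hmn, hmx, zero_add]
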